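-- pv_equiv track=rewrite | github.com/ShichaoMa/old-spider | jay-scraper/crawling/pipelines/amazon_pipeline.py | choice
-- ===== SOURCE A (Python) =====
-- def choice(name, nums):
--     return_val = ""
--     for n, num in nums.items():
--         return_val = num or return_val
--         if n == name and num:
--             return_val = num
--             break
--     return return_val
-- ===== SOURCE B (Python) =====
-- def choice(name, nums):
--     if nums.get(name):
--         return nums[name]
--     result = ""
--     for num in nums.values():
--         if num:
--             result = num
--     return result
-- ===== Notes on version B (the rewrite author's own statement) =====
-- stated objective: simpler
-- what changed: Replaces A's single loop with in-loop break and combined accumulator by a direct truthy lookup of the named key followed by a plain last-truthy scan over the values.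
import Mathlib
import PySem

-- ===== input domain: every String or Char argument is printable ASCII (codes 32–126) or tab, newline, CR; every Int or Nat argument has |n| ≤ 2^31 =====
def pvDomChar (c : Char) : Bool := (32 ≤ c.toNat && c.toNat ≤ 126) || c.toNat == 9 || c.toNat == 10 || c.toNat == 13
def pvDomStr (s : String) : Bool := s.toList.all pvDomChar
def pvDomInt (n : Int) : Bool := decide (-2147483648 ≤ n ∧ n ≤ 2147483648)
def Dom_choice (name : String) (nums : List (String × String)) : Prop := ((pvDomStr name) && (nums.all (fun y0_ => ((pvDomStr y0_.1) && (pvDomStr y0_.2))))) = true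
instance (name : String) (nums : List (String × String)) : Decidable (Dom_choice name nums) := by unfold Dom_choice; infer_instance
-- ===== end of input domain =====

-- B replaces A's loop-with-break by a named-key truthy guard plus a plain last-truthy scan (objective: simpler).

-- ===== PORT A =====
-- the for-loop over nums.items(): carries return_val; `break` = returning num immediately
def choiceLoop (name : String) : List (String × String) → String → String
  | [], rv => rv
  | (n, num) :: rest, rv =>
    -- return_val = num or return_val
    let rv' := if num = "" then rv else num
    -- if n == name and num: return_val = num; break
    if n = name ∧ num ≠ "" then num else choiceLoop name rest rv'

def choice (name : String) (nums : List (String × String)) : String :=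
  choiceLoop name nums ""

-- ===== PORT B =====
-- for num in nums.values(): if num: result = num
def lastTruthy : List String → String → String
  | [], acc => acc
  | v :: rest, acc => lastTruthy rest (if v = "" then acc else v)

def choice_alt (name : String) (nums : List (String × String)) : String :=
  -- if nums.get(name): return nums[name]
  match PySem.Dict.get? ⟨nums⟩ name with
  | some v => if v ≠ "" then v else lastTruthy (nums.map Prod.snd) ""
  | none => lastTruthy (nums.map Prod.snd) ""

-- ===== PRECONDITION & SPEC =====
-- Pre_ excludes association lists with duplicate keys: nums is a Python dict, whose keys are
-- necessarily distinct, so such lists do not correspond to any Python input.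
def Pre_choice (name : String) (nums : List (String × String)) : Prop :=
  (nums.map Prod.fst).Nodup
instance (name : String) (nums : List (String × String)) : Decidable (Pre_choice name nums) := by unfold Pre_choice; infer_instance
def pvWitness_choice : String × (List (String × String)) := ("b", [("a", ""), ("b", "7")])

def Spec_choice (name : String) (nums : List (String × String)) (out : String) : Prop := out = choice_alt name nums
instance (name : String) (nums : List (String × String)) (out : String) : Decidable (Spec_choice name nums out) := by unfold Spec_choice; infer_instance

-- ===== CLAIM (what is proved, stated in full; the proofs are below) =====
def Claim_equal_choice : Prop := ∀ (name : String) (nums : List (String × String)), Dom_choice name nums → Pre_choice name nums → Spec_choice name nums (choice name nums)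

-- ===== LEMMAS AND PROOFS =====

theorem get?_eq_none_of_not_mem (name : String) (l : List (String × String))
    (h : name ∉ l.map Prod.fst) : PySem.Dict.get? ⟨l⟩ name = none := by
  induction l with
  | nil => rfl
  | cons p rest ih =>
    simp only [List.map_cons, List.mem_cons, not_or] at h
    rw [PySem.Dict.get?_mk_cons]
    have : (p.1 == name) = false := by
      simp [beq_iff_eq]; exact fun e => h.1 e.symm
    rw [this]
    simp only [Bool.false_eq_true, if_false]
    exact ih h.2

theorem choiceLoop_eq (name : String) (l : List (String × String)) (rv : String)
    (h : (l.map Prod.fst).Nodup) :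
    choiceLoop name l rv =
      match PySem.Dict.get? ⟨l⟩ name with
      | some v => if v ≠ "" then v else lastTruthy (l.map Prod.snd) rv
      | none => lastTruthy (l.map Prod.snd) rv := by
  induction l generalizing rv with
  | nil => rfl
  | cons p rest ih =>
    obtain ⟨n, num⟩ := p
    simp only [List.map_cons, List.nodup_cons] at h
    rw [PySem.Dict.get?_mk_cons]
    by_cases hn : n = name
    · subst hn
      simp only [beq_self_eq_true, if_true]
      by_cases hnum : num = ""
      · subst hnum
        simp only [choiceLoop, ne_eq, not_true_eq_false, and_false, if_false, if_pos rfl,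
          if_true, List.map_cons, lastTruthy]
        rw [ih rv h.2, get?_eq_none_of_not_mem n rest h.1]
      · simp [choiceLoop, hnum]
    · have hb : (n == name) = false := by simp [beq_iff_eq, hn]
      rw [hb]
      simp only [Bool.false_eq_true, if_false]
      simp only [choiceLoop, lastTruthy, hn, false_and, if_false, List.map_cons]
      by_cases hnum : num = ""
      · simp only [hnum, if_pos rfl, lastTruthy, if_pos rfl]
        exact ih rv h.2
      · simp only [if_neg hnum, lastTruthy, if_neg hnum]
        exact ih num h.2

-- ===== VERDICT (by name: the statement is the Claim_ definition above) =====
theorem choice_spec : Claim_equal_choice := by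
  intro name nums _ hpre
  unfold Spec_choice choice choice_alt
  rw [choiceLoop_eq name nums "" hpre]
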